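-- pv_equiv track=rewrite | github.com/JuliaBilan/python-2024 | pr1.py/name.py | check_zero_one_sequence
-- ===== SOURCE A (Python) =====
-- def check_zero_one_sequence(s):
--     zero_count = 0
--     one_count = 0
--     i = 0
--     length = len(s)
--     while i < length:
--         if s[i] == '0':
--             while i < length and s[i] == '0':
--                 zero_count += 1
--                 i += 1
--             while i < length and s[i] == '1':
--                 one_count += 1
--                 i += 1
--             if zero_count != one_count:
--                 return False
--             zero_count = 0
--             one_count = 0
--         else:
--             i += 1
--     return True
-- ===== SOURCE B (Python) =====
-- def check_zero_one_sequence(s):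
--     # Run-length encode the string, then check that every '0' run is
--     # immediately followed by a '1' run of the same length.
--     runs = []
--     for ch in s:
--         if runs and runs[-1][0] == ch:
--             runs[-1] = (ch, runs[-1][1] + 1)
--         else:
--             runs.append((ch, 1))
--     j = 0
--     while j < len(runs):
--         ch, n = runs[j]
--         if ch == '0':
--             if j + 1 < len(runs) and runs[j + 1] == ('1', n):
--                 j += 2
--             else:
--                 return False
--         else:
--             j += 1
--     return True
-- ===== Notes on version B (the rewrite author's own statement) =====
-- stated objective: alternative
-- what changed: B run-length encodes the string in one forward pass and then judges adjacent run pairs (each '0' run must be followed by an equal-length '1' run), replacing A's nested while-loops with in-place counters.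
import Mathlib
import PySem

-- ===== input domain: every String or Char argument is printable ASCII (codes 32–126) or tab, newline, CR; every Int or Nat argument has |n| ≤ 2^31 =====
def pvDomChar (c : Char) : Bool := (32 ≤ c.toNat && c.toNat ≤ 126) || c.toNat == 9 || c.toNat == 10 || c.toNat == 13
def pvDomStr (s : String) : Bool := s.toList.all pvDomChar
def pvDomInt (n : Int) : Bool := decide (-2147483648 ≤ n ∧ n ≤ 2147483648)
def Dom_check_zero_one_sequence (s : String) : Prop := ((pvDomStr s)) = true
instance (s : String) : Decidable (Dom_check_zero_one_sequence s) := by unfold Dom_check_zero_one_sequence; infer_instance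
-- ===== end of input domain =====

-- B run-length encodes the string in one forward pass and then judges adjacent run pairs
-- ('0' run must be followed by an equal-length '1' run): alternative decomposition, same cost.

-- ===== PORT A =====
-- A's inner while loops: consume the maximal prefix of character c, returning (count, rest)
def pvTakeRun (c : Char) : List Char → Nat × List Char
  | [] => (0, [])
  | x :: xs =>
    if x = c then
      ((pvTakeRun c xs).1 + 1, (pvTakeRun c xs).2)
    else (0, x :: xs)

theorem pvTakeRun_rest_le (c : Char) : ∀ l : List Char, (pvTakeRun c l).2.length ≤ l.length := by
  intro l
  induction l with
  | nil => simp [pvTakeRun]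
  | cons x xs ih =>
    simp only [pvTakeRun]
    split
    · simpa using Nat.le_succ_of_le ih
    · simp

-- A's outer while loop
def pvALoop : List Char → Bool
  | [] => true
  | x :: xs =>
    if x = '0' then
      if (pvTakeRun '0' (x :: xs)).1 ≠ (pvTakeRun '1' (pvTakeRun '0' (x :: xs)).2).1 then false
      else pvALoop (pvTakeRun '1' (pvTakeRun '0' (x :: xs)).2).2
    else pvALoop xs
termination_by l => l.length
decreasing_by
  · have h1 : (pvTakeRun '0' (x :: xs)).2.length ≤ xs.length := by
      simp only [pvTakeRun]
      split
      · simpa using pvTakeRun_rest_le '0' xs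
      · simp_all
    have h2 := pvTakeRun_rest_le '1' (pvTakeRun '0' (x :: xs)).2
    simp only [List.length_cons]
    omega
  · simp

def check_zero_one_sequence (s : String) : Bool := pvALoop s.toList

-- ===== PORT B =====
-- B's for loop body: extend the last run by one, or append a fresh run of length 1
def pvSnoc (runs : List (Char × Nat)) (ch : Char) : List (Char × Nat) :=
  match runs.getLast? with
  | some (c, n) => if c = ch then runs.dropLast ++ [(ch, n + 1)] else runs ++ [(ch, 1)]
  | none => [(ch, 1)]

-- B's for loop: run-length encode the string front to back
def pvRunsF (l : List Char) : List (Char × Nat) := l.foldl pvSnoc []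

-- B's while loop: walk the runs, pairing each '0' run with the following '1' run
def pvBWalk : List (Char × Nat) → Bool
  | [] => true
  | (ch, n) :: rest =>
    if ch = '0' then
      match rest with
      | (c2, m) :: rest' => if c2 = '1' ∧ m = n then pvBWalk rest' else false
      | [] => false
    else pvBWalk rest

def check_zero_one_sequence_alt (s : String) : Bool := pvBWalk (pvRunsF s.toList)

-- ===== PRECONDITION & SPEC =====
def Spec_check_zero_one_sequence (s : String) (out : Bool) : Prop := out = check_zero_one_sequence_alt s
instance (s : String) (out : Bool) : Decidable (Spec_check_zero_one_sequence s out) := by unfold Spec_check_zero_one_sequence; infer_instance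

-- ===== CLAIM (what is proved, stated in full; the proofs are below) =====
def Claim_equal_check_zero_one_sequence : Prop := ∀ (s : String), Dom_check_zero_one_sequence s → Spec_check_zero_one_sequence s (check_zero_one_sequence s)

-- ===== LEMMAS AND PROOFS =====

-- proof-side run-length encoding built back to front (foldr), easier to reason about
def pvRunStep (ch : Char) (runs : List (Char × Nat)) : List (Char × Nat) :=
  match runs with
  | (c, n) :: t => if c = ch then (ch, n + 1) :: t else (ch, 1) :: (c, n) :: t
  | [] => [(ch, 1)]

def pvRuns (l : List Char) : List (Char × Nat) := l.foldr pvRunStep []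

theorem pvSnoc_cons (p : Char × Nat) (rest : List (Char × Nat)) (a : Char) (h : rest ≠ []) :
    pvSnoc (p :: rest) a = p :: pvSnoc rest a := by
  obtain ⟨q, t, rfl⟩ := List.exists_cons_of_ne_nil h
  simp only [pvSnoc, List.getLast?_cons_cons, List.dropLast_cons_of_ne_nil (by simp : q :: t ≠ [])]
  rcases h2 : (q :: t).getLast? with _ | ⟨c, n⟩
  · simp [List.getLast?_eq_none_iff] at h2
  · by_cases hc : c = a <;> simp [hc]

theorem pvSnoc_runStep_comm (rs : List (Char × Nat)) (x a : Char) :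
    pvSnoc (pvRunStep x rs) a = pvRunStep x (pvSnoc rs a) := by
  match rs with
  | [] =>
    by_cases h : x = a <;> simp [pvRunStep, pvSnoc, h, eq_comm]
  | [(c, n)] =>
    by_cases hcx : c = x <;> by_cases hca : c = a <;> by_cases hxa : x = a <;>
      simp_all [pvRunStep, pvSnoc]
  | (c, n) :: q :: t =>
    have hne : q :: t ≠ [] := by simp
    by_cases hcx : c = x
    · rw [pvRunStep, if_pos hcx, pvSnoc_cons _ _ _ hne, pvSnoc_cons _ _ _ hne,
        pvRunStep, if_pos hcx]
    · rw [pvRunStep, if_neg hcx, pvSnoc_cons _ _ _ (by simp),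
        pvSnoc_cons _ _ _ hne]
      simp [pvRunStep, hcx]

theorem pvRuns_snoc (l : List Char) (a : Char) :
    pvRuns (l ++ [a]) = pvSnoc (pvRuns l) a := by
  induction l with
  | nil => simp [pvRuns, pvRunStep, pvSnoc]
  | cons x l ih =>
    show pvRunStep x (pvRuns (l ++ [a])) = pvSnoc (pvRunStep x (pvRuns l)) a
    rw [ih, pvSnoc_runStep_comm]

theorem pvRunsF_eq (l : List Char) : pvRunsF l = pvRuns l := by
  induction l using List.reverseRecOn with
  | nil => rfl
  | append_singleton l a ih =>
    rw [pvRuns_snoc, ← ih]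
    simp [pvRunsF]

-- concatenation of a run list back into characters
def pvFlat (rs : List (Char × Nat)) : List Char := rs.flatMap (fun p => List.replicate p.2 p.1)

-- a run list does not start with character c
def pvSep (c : Char) : List (Char × Nat) → Prop
  | (c2, _) :: _ => c2 ≠ c
  | [] => True

-- well-formed run list: positive lengths, adjacent runs have distinct characters
def pvGood : List (Char × Nat) → Prop
  | [] => True
  | (c, n) :: rest => 1 ≤ n ∧ pvSep c rest ∧ pvGood rest

theorem pvFlat_runs (l : List Char) : pvFlat (pvRuns l) = l := by
  induction l with
  | nil => simp [pvRuns, pvFlat]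
  | cons a l ih =>
    show pvFlat (pvRunStep a (pvRuns l)) = a :: l
    rcases h : pvRuns l with _ | ⟨⟨c, n⟩, t⟩ <;> simp_all [pvRunStep, pvFlat]
    split
    · next hc =>
      subst hc
      simp [List.replicate_succ]
      simpa [pvFlat] using ih
    · simpa [pvFlat] using ih

theorem pvGood_runs (l : List Char) : pvGood (pvRuns l) := by
  induction l with
  | nil => simp [pvRuns, pvGood]
  | cons a l ih =>
    show pvGood (pvRunStep a (pvRuns l))
    rcases h : pvRuns l with _ | ⟨⟨c, n⟩, t⟩
    · simp [pvRunStep, pvGood, pvSep]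
    · rw [h] at ih
      simp only [pvRunStep]
      split
      · next hc =>
        rcases ih with ⟨hn, ht, hg⟩
        subst hc
        exact ⟨by omega, ht, hg⟩
      · next hc =>
        exact ⟨le_refl 1, fun hca => hc hca, ih⟩

theorem pvTakeRun_replicate_append (c : Char) (n : Nat) (t : List Char)
    (h : t.head? ≠ some c) : pvTakeRun c (List.replicate n c ++ t) = (n, t) := by
  induction n with
  | zero =>
    cases t with
    | nil => simp [pvTakeRun]
    | cons x xs =>
      have : x ≠ c := by simpa using h
      simp [pvTakeRun, this]
  | succ k ih => simp [List.replicate_succ, pvTakeRun, ih]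

theorem pvFlat_cons (c : Char) (n : Nat) (rs : List (Char × Nat)) :
    pvFlat ((c, n) :: rs) = List.replicate n c ++ pvFlat rs := by
  simp [pvFlat]

theorem pvHead_flat_good (c : Char) (n : Nat) (rs : List (Char × Nat))
    (hn : 1 ≤ n) : (pvFlat ((c, n) :: rs)).head? = some c := by
  obtain ⟨k, rfl⟩ : ∃ k, n = k + 1 := ⟨n - 1, by omega⟩
  simp [pvFlat, List.replicate_succ]

theorem pvHead_flat_ne (c : Char) (rs : List (Char × Nat))
    (hg : pvGood rs) (hne : pvSep c rs) : (pvFlat rs).head? ≠ some c := by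
  cases rs with
  | nil => simp [pvFlat]
  | cons p t =>
    obtain ⟨c2, m⟩ := p
    rw [pvHead_flat_good c2 m t hg.1]
    simp only [ne_eq, Option.some.injEq]
    exact hne

theorem pvFlat_length (c : Char) (n : Nat) (rs : List (Char × Nat)) :
    (pvFlat ((c, n) :: rs)).length = n + (pvFlat rs).length := by
  simp [pvFlat_cons]

theorem pvBWalk_skip (c : Char) (n : Nat) (rest : List (Char × Nat)) (hc : c ≠ '0') :
    pvBWalk ((c, n) :: rest) = pvBWalk rest := by
  cases rest with
  | nil => simp [pvBWalk, hc]
  | cons q t => obtain ⟨c2, m⟩ := q; simp [pvBWalk, hc]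

theorem pvBWalk_zero_cons (n : Nat) (c2 : Char) (m : Nat) (rest' : List (Char × Nat)) :
    pvBWalk (('0', n) :: (c2, m) :: rest') =
      if c2 = '1' ∧ m = n then pvBWalk rest' else false := by
  simp [pvBWalk]

theorem pvMain : ∀ (k : Nat) (rs : List (Char × Nat)), (pvFlat rs).length ≤ k → pvGood rs →
    pvALoop (pvFlat rs) = pvBWalk rs := by
  intro k
  induction k with
  | zero =>
    intro rs hlen hg
    cases rs with
    | nil => simp [pvFlat, pvALoop, pvBWalk]
    | cons p t =>
      obtain ⟨c, n⟩ := p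
      exfalso
      have hh := pvHead_flat_good c n t hg.1
      cases hf : pvFlat ((c, n) :: t) with
      | nil => rw [hf] at hh; simp at hh
      | cons y ys => rw [hf] at hlen; simp at hlen
  | succ k ih =>
    intro rs hlen hg
    cases rs with
    | nil => simp [pvFlat, pvALoop, pvBWalk]
    | cons p rest =>
      obtain ⟨c, n⟩ := p
      rcases hg with ⟨hn, hsep, hgr⟩
      obtain ⟨n', rfl⟩ : ∃ n', n = n' + 1 := ⟨n - 1, by omega⟩
      have hflat : pvFlat ((c, n' + 1) :: rest) = c :: (List.replicate n' c ++ pvFlat rest) := by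
        simp [pvFlat, List.replicate_succ]
      by_cases hc : c = '0'
      · -- A enters the counting branch
        subst hc
        have hne0 : (pvFlat rest).head? ≠ some '0' := pvHead_flat_ne '0' rest hgr hsep
        have htr0 : pvTakeRun '0' ('0' :: (List.replicate n' '0' ++ pvFlat rest)) =
            (n' + 1, pvFlat rest) := by
          rw [← hflat, pvFlat_cons]
          exact pvTakeRun_replicate_append '0' (n' + 1) _ hne0
        rw [hflat, pvALoop, if_pos rfl, htr0]
        cases rest with
        | nil =>
          simp [pvFlat, pvTakeRun, pvBWalk]
        | cons q rest' =>
          obtain ⟨c2, m⟩ := q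
          rcases hgr with ⟨hm, hsep2, hgr'⟩
          obtain ⟨m', rfl⟩ : ∃ m', m = m' + 1 := ⟨m - 1, by omega⟩
          have hlen' : (n' + 1) + ((m' + 1) + (pvFlat rest').length) ≤ k + 1 := by
            rw [pvFlat_length, pvFlat_length] at hlen
            exact hlen
          by_cases hc2 : c2 = '1'
          · subst hc2
            have hne1 : (pvFlat rest').head? ≠ some '1' := pvHead_flat_ne '1' rest' hgr' hsep2
            have htr1 : pvTakeRun '1' (pvFlat (('1', m' + 1) :: rest')) = (m' + 1, pvFlat rest') := by
              rw [pvFlat_cons]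
              exact pvTakeRun_replicate_append '1' (m' + 1) _ hne1
            rw [htr1]
            by_cases heq : n' = m'
            · subst heq
              rw [if_neg (by omega)]
              rw [pvBWalk_zero_cons, if_pos ⟨rfl, rfl⟩]
              exact ih rest' (by omega) hgr'
            · rw [if_pos (by omega)]
              rw [pvBWalk_zero_cons, if_neg (by simp; omega)]
          · -- the run after the zeros is not a '1' run: one_count = 0
            have hne1 : (pvFlat ((c2, m' + 1) :: rest')).head? ≠ some '1' := by
              rw [pvHead_flat_good c2 (m' + 1) rest' (by omega)]
              simp [hc2]
            have htr1 : pvTakeRun '1' (pvFlat ((c2, m' + 1) :: rest')) =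
                (0, pvFlat ((c2, m' + 1) :: rest')) := by
              have := pvTakeRun_replicate_append '1' 0 (pvFlat ((c2, m' + 1) :: rest')) hne1
              simpa using this
            rw [htr1, if_pos (by omega)]
            rw [pvBWalk_zero_cons, if_neg (by simp [hc2])]
      · -- A skips the single head character; B skips the whole run
        rw [hflat, pvALoop, if_neg hc, pvBWalk_skip c (n' + 1) rest hc]
        cases n' with
        | zero =>
          have hlen0 : (pvFlat rest).length ≤ k := by
            rw [pvFlat_length] at hlen; omega
          simpa using ih rest hlen0 hgr
        | succ j =>
          have hg' : pvGood ((c, j + 1) :: rest) := ⟨by omega, hsep, hgr⟩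
          have hlen1 : (pvFlat ((c, j + 1) :: rest)).length ≤ k := by
            rw [pvFlat_length] at hlen
            rw [pvFlat_length]
            omega
          have hmain := ih ((c, j + 1) :: rest) hlen1 hg'
          rw [pvFlat_cons] at hmain
          rw [hmain, pvBWalk_skip c (j + 1) rest hc]

-- ===== VERDICT (by name: the statement is the Claim_ definition above) =====
theorem check_zero_one_sequence_spec : Claim_equal_check_zero_one_sequence := by
  intro s _
  show check_zero_one_sequence s = check_zero_one_sequence_alt s
  unfold check_zero_one_sequence check_zero_one_sequence_alt
  rw [pvRunsF_eq, ← pvFlat_runs s.toList]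
  rw [pvMain (pvFlat (pvRuns s.toList)).length (pvRuns s.toList) le_rfl (pvGood_runs s.toList)]
  rw [pvFlat_runs]
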